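-- pv_equiv track=rewrite | github.com/gudkovst/Analysis-Pushkin-style | utils/features.py | passing
-- ===== SOURCE A (Python) =====
-- def passing(word_list: list) -> list:
--     res = [0]
--     word_used = set()
--     for word in word_list:
--         if word in word_used:
--             res.append(res[-1])
--         else:
--             word_used.add(word)
--             res.append(res[-1] + 1)
--     return res[1:]
-- ===== SOURCE B (Python) =====
-- from itertools import accumulate
--
-- def passing(word_list: list) -> list:
--     seen = set()
--     mask = []
--     for word in word_list:
--         if word in seen:
--             mask.append(0)
--         else:
--             seen.add(word)
--             mask.append(1)
--     return list(accumulate(mask))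
-- ===== Notes on version B (the rewrite author's own statement) =====
-- stated objective: alternative
-- what changed: A's single fused loop that appends res[-1] or res[-1]+1 and slices off the seed 0 is replaced by two differently-shaped passes: a 0/1 novelty mask built with a set, then itertools.accumulate as a prefix sum.
import Mathlib
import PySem

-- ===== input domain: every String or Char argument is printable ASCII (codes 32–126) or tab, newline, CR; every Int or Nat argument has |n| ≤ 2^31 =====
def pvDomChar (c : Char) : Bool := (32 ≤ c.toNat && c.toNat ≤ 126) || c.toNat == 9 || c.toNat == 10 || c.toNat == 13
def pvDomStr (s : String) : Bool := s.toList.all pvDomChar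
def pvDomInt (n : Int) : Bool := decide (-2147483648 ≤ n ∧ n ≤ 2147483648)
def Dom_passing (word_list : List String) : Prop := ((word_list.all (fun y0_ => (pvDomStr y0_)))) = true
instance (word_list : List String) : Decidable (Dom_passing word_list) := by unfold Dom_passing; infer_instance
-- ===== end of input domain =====

-- B replaces A's fused detect-and-increment loop (reading res[-1]) by two passes: a 0/1
-- novelty mask built with a set, then a prefix-sum accumulation (alternative decomposition).


-- ===== PORT A =====
-- the for-loop over word_list, carrying (res, word_used); res[-1] = getLast! is exact
-- because res is nonempty throughout (it starts as [0] and only grows)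
def passingLoop (words : List String) (res : List Int) (used : PySem.Set String) :
    List Int × PySem.Set String :=
  match words with
  | [] => (res, used)
  | w :: ws =>
    if PySem.Set.contains used w then
      passingLoop ws (res ++ [res.getLast!]) used
    else
      passingLoop ws (res ++ [res.getLast! + 1]) (PySem.Set.add used w)

def passing (word_list : List String) : List Int :=
  -- res = [0]; word_used = set(); loop; return res[1:]
  (passingLoop word_list [0] PySem.Set.empty).1.drop 1

-- ===== PORT B =====
-- first pass: the 0/1 novelty mask (with the seen-set)
def maskLoop (words : List String) (seen : PySem.Set String) : List Int :=
  match words with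
  | [] => []
  | w :: ws =>
    if PySem.Set.contains seen w then
      0 :: maskLoop ws seen
    else
      1 :: maskLoop ws (PySem.Set.add seen w)

-- second pass: itertools.accumulate (running prefix sum)
def accum (xs : List Int) (acc : Int) : List Int :=
  match xs with
  | [] => []
  | x :: t => (acc + x) :: accum t (acc + x)

def passing_alt (word_list : List String) : List Int :=
  accum (maskLoop word_list PySem.Set.empty) 0

-- ===== PRECONDITION & SPEC =====
def Spec_passing (word_list : List String) (out : List Int) : Prop := out = passing_alt word_list
instance (word_list : List String) (out : List Int) : Decidable (Spec_passing word_list out) := by unfold Spec_passing; infer_instance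

-- ===== CLAIM (what is proved, stated in full; the proofs are below) =====
def Claim_equal_passing : Prop := ∀ (word_list : List String), Dom_passing word_list → Spec_passing word_list (passing word_list)

-- ===== LEMMAS AND PROOFS =====
theorem getLast!_append_singleton (xs : List Int) (a : Int) : (xs ++ [a]).getLast! = a := by
  simp [List.getLast!_eq_getLast?_getD, List.getLast?_append]
theorem passingLoop_eq (words : List String) :
    ∀ (used : PySem.Set String) (res0 : List Int) (c : Int),
      (passingLoop words (res0 ++ [c]) used).1
        = res0 ++ [c] ++ accum (maskLoop words used) c := by
  induction words with
  | nil => intro used res0 c; simp [passingLoop, maskLoop, accum]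
  | cons w ws ih =>
    intro used res0 c
    simp only [passingLoop, maskLoop]
    split
    · have h := ih used (res0 ++ [c]) c
      rw [List.append_assoc] at h
      simpa [getLast!_append_singleton, accum, List.append_assoc] using h
    · have h := ih (PySem.Set.add used w) (res0 ++ [c]) (c + 1)
      rw [List.append_assoc] at h
      simpa [getLast!_append_singleton, accum, List.append_assoc] using h

-- ===== VERDICT (by name: the statement is the Claim_ definition above) =====
theorem passing_spec : Claim_equal_passing := by
  intro wl _
  unfold Spec_passing passing passing_alt
  have h := passingLoop_eq wl PySem.Set.empty [] 0
  simp only [List.nil_append] at h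
  show (passingLoop wl [0] PySem.Set.empty).1.drop 1 = _
  rw [h]; rfl
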